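-- pv_equiv track=rewrite | github.com/covrebo/python100 | 06_list_comprehensions_generators/d3_pybite5.py | shortest_first_name
-- ===== SOURCE A (Python) =====
-- def dedup_and_title_case_names(names):
--     """Should return a list of title cased names,
--        each name appears only once"""
--     final_list = []
--     for name in names:
--         if name.title() not in final_list:
--             final_list.append(name.title())
--     return final_list
--
-- def shortest_first_name(names):
--     """Returns the shortest first name (str).
--        You can assume there is only one shortest name.
--     """
--     names = dedup_and_title_case_names(names)
--     shortest_name = (names[0], len(names[0]))
--     for name in names:
--         if len(name) < shortest_name[1]:
--             shortest_name = (name, len(name))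
--     f_name = shortest_name[0].split()
--     return f_name[0]
-- ===== SOURCE B (Python) =====
-- def dedup_and_title_case_names(names):
--     final_list = []
--     for name in names:
--         if name.title() not in final_list:
--             final_list.append(name.title())
--     return final_list
--
-- def shortest_first_name(names):
--     names = dedup_and_title_case_names(names)
--     shortest = sorted(names, key=len)[0]
--     return shortest.split()[0]
-- ===== Notes on version B (the rewrite author's own statement) =====
-- stated objective: simpler
-- what changed: B replaces A's running strict-< minimum scan (tuple accumulator of name and length) by a stable sort of the deduplicated list with key=len and taking the head, relying on sort stability to pick the first minimal-length name like A's scan.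
import Mathlib
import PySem

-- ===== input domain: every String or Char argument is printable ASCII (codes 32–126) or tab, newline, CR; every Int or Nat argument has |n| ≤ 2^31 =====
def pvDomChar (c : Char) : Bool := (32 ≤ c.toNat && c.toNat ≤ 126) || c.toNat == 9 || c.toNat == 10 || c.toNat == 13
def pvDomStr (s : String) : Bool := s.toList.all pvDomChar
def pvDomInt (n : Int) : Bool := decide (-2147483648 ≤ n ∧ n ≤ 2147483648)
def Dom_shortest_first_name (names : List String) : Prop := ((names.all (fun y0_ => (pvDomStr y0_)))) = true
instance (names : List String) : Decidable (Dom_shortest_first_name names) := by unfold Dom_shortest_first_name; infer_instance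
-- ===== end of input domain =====

-- B: sort the deduplicated list by length and take the head instead of A's running minimum scan (objective: simpler).

-- ===== PORT A =====
-- str.title() ported by hand (exact on ASCII): uppercase a letter that follows a
-- non-letter, lowercase a letter that follows a letter, leave other chars alone.
def pyTitleChars : List Char → Bool → List Char
  | [], _ => []
  | c :: cs, prev =>
      (if PySem.Chars.isalpha c then (if prev then PySem.Chars.lowerChar c else PySem.Chars.upperChar c) else c)
        :: pyTitleChars cs (PySem.Chars.isalpha c)

def pyTitle (s : String) : String := String.ofList (pyTitleChars s.toList false)

def dedup_and_title_case_names (names : List String) : List String :=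
  names.foldl (fun final_list name =>
    if pyTitle name ∈ final_list then final_list else final_list ++ [pyTitle name]) []

def shortest_first_name (names : List String) : String :=
  let ns := dedup_and_title_case_names names
  let n0 := (PySem.List.pyGet? ns 0).getD ""   -- names[0]; IndexError (none) only outside Pre_
  let shortest := ns.foldl
    (fun p name => if PySem.Str.len name < p.2 then (name, PySem.Str.len name) else p)
    (n0, PySem.Str.len n0)
  let f_name := PySem.Str.split₀ shortest.1
  (PySem.List.pyGet? f_name 0).getD ""         -- f_name[0]; IndexError (none) only outside Pre_

-- ===== PORT B =====
def shortest_first_name_alt (names : List String) : String :=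
  let ns := dedup_and_title_case_names names
  let shortest := (PySem.List.pyGet? (PySem.List.sorted ns (fun n => PySem.Str.len n) false) 0).getD ""
  (PySem.List.pyGet? (PySem.Str.split₀ shortest) 0).getD ""

-- ===== PRECONDITION & SPEC =====
-- Pre_ excludes exactly the inputs where Python A raises: the empty list (IndexError on
-- names[0]) and lists whose first name of minimal length is empty or all whitespace
-- (its title-cased form is still all whitespace, so .split() is empty and [0] raises).
def Pre_shortest_first_name (names : List String) : Prop :=
  (names.find? (fun n => decide (∀ m ∈ names, PySem.Str.len n ≤ PySem.Str.len m))).any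
    (fun n => n.toList.any (fun c => !PySem.Chars.isspace c)) = true
instance (names : List String) : Decidable (Pre_shortest_first_name names) := by
  unfold Pre_shortest_first_name; infer_instance

def pvWitness_shortest_first_name : List String := ["Bob Jones", "amy lee", "AMY LEE"]

def Spec_shortest_first_name (names : List String) (out : String) : Prop := out = shortest_first_name_alt names
instance (names : List String) (out : String) : Decidable (Spec_shortest_first_name names out) := by unfold Spec_shortest_first_name; infer_instance

-- ===== CLAIM (what is proved, stated in full; the proofs are below) =====
def Claim_equal_shortest_first_name : Prop := ∀ (names : List String), Dom_shortest_first_name names → Pre_shortest_first_name names → Spec_shortest_first_name names (shortest_first_name names)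

-- ===== LEMMAS AND PROOFS =====

-- A's running strict-< minimum scan over a list with head a equals the head of the
-- stable insertion sort (foldl insertBy) of that list, for any accumulator headed by a.
lemma scan_eq_insert_head :
    ∀ (t : List String) (a : String) (as : List String),
      (t.foldl
        (fun p name => if PySem.Str.len name < p.2 then (name, PySem.Str.len name) else p)
        (a, PySem.Str.len a)).1
      =
      (t.foldl
        (fun acc x => PySem.List.insertBy
          (fun u v => decide (PySem.Str.len u < PySem.Str.len v)) x acc)
        (a :: as)).headD "" := by
  intro t
  induction t with
  | nil => intro a as; rfl
  | cons v t ih =>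
      intro a as
      simp only [List.foldl_cons, PySem.List.insertBy]
      by_cases h : PySem.Str.len v < PySem.Str.len a
      · simp only [h, if_pos, decide_eq_true_eq]
        exact ih v (a :: as)
      · simp only [h, decide_eq_true_eq, if_false]
        exact ih a (PySem.List.insertBy (fun u v => decide (PySem.Str.len u < PySem.Str.len v)) v as)

-- the two ports agree on every input (Pre_ only marks where the Python A returns)
lemma ports_eq (names : List String) :
    shortest_first_name names = shortest_first_name_alt names := by
  show (let ns := dedup_and_title_case_names names
        let n0 := (PySem.List.pyGet? ns 0).getD ""
        let shortest := ns.foldl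
          (fun p name => if PySem.Str.len name < p.2 then (name, PySem.Str.len name) else p)
          (n0, PySem.Str.len n0)
        let f_name := PySem.Str.split₀ shortest.1
        (PySem.List.pyGet? f_name 0).getD "")
      = _
  simp only []
  unfold shortest_first_name_alt
  simp only []
  rw [PySem.List.sorted_eq_foldl_insertBy]
  cases h : dedup_and_title_case_names names with
  | nil => rfl
  | cons x t =>
      simp only [List.foldl_cons, PySem.List.insertBy]
      have hget : (PySem.List.pyGet? (x :: t) 0).getD "" = x := by
        simp [PySem.List.pyGet?, PySem.List.pyIdx?]
      rw [hget]
      have hstep : (if PySem.Str.len x < PySem.Str.len x then (x, PySem.Str.len x)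
          else (x, PySem.Str.len x)) = (x, PySem.Str.len x) := by simp
      rw [hstep]
      rw [scan_eq_insert_head t x []]
      congr 1
      cases hr : t.foldl (fun acc y => PySem.List.insertBy
          (fun u v => decide (PySem.Str.len u < PySem.Str.len v)) y acc) [x] with
      | nil => rfl
      | cons b bs => simp [PySem.List.pyGet?, PySem.List.pyIdx?]

theorem shortest_first_name_spec : Claim_equal_shortest_first_name := by
  intro names _ _
  exact ports_eq names
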